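-- pv_equiv track=rewrite | github.com/harvard-edge/cs249r_book | tinytorch/site-legacy/instructor/tools/analysis_notebook_structure.py | _parse_jupytext_cells
-- ===== SOURCE A (Python) =====
-- from typing import List, Dict, Tuple, Optional
--
-- def _parse_jupytext_cells(content: str) -> List[Dict]:
--     """Parse Jupytext percent format cells"""
--     cells = []
--     current_cell = {"type": "code", "content": ""}
--
--     lines = content.split('\n')
--     i = 0
--
--     while i < len(lines):
--         line = lines[i]
--
--         if line.strip() == "# %% [markdown]":
--             # Save current cell and start markdown cell
--             if current_cell["content"].strip():
--                 cells.append(current_cell)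
--             current_cell = {"type": "markdown", "content": ""}
--             i += 1
--             continue
--
--         elif line.strip() == "# %%":
--             # Save current cell and start code cell
--             if current_cell["content"].strip():
--                 cells.append(current_cell)
--             current_cell = {"type": "code", "content": ""}
--             i += 1
--             continue
--
--         # Add line to current cell
--         current_cell["content"] += line + "\n"
--         i += 1
--
--     # Add final cell
--     if current_cell["content"].strip():
--         cells.append(current_cell)
--
--     return cells
-- ===== SOURCE B (Python) =====
-- def _parse_jupytext_cells(content: str):
--     """Parse Jupytext percent format cells (two-pass: segment, then render)."""
--     segments = []
--     seg_type, seg_lines = "code", []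
--     for line in content.split('\n'):
--         marker = line.strip()
--         if marker == "# %% [markdown]" or marker == "# %%":
--             segments.append((seg_type, seg_lines))
--             seg_type = "markdown" if marker == "# %% [markdown]" else "code"
--             seg_lines = []
--         else:
--             seg_lines.append(line)
--     segments.append((seg_type, seg_lines))
--
--     cells = []
--     for t, lines in segments:
--         text = "\n".join(lines) + "\n" if lines else ""
--         if text.strip():
--             cells.append({"type": t, "content": text})
--     return cells
-- ===== Notes on version B (the rewrite author's own statement) =====
-- stated objective: alternative
-- what changed: A interleaves parsing and output in one flush-on-marker loop that grows the current cell's content by string concatenation; B first partitions the lines into (type, line-list) segments at the markers, then a second pass renders each segment with a single join and filters out blank segments.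
import Mathlib
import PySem

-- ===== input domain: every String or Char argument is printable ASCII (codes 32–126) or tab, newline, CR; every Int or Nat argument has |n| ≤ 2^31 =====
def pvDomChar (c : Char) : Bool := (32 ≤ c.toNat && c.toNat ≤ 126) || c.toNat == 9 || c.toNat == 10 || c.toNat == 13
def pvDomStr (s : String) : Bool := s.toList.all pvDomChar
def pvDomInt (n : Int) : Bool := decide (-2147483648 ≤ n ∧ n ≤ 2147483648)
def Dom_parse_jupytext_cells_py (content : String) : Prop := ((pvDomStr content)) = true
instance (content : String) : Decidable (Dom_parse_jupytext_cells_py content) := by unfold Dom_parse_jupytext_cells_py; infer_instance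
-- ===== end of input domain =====

-- B replaces A's single flush-on-marker loop with incremental string `+=` by two passes:
-- partition the lines into (type, lines) segments, then render/filter each segment (objective: alternative decomposition).

-- ===== PORT A =====
-- A's while-loop body over lines, state (cells, current type, current content); strings kept as List Char internally (exact).
def pvStepA (st : List (List (String × String)) × String × List Char) (line : List Char) :
    List (List (String × String)) × String × List Char :=
  let (cells, t, c) := st
  if PySem.Chars.strip line = "# %% [markdown]".toList then
    (if PySem.Chars.strip c ≠ [] then cells ++ [[("type", t), ("content", String.ofList c)]] else cells,
     "markdown", [])
  else if PySem.Chars.strip line = "# %%".toList then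
    (if PySem.Chars.strip c ≠ [] then cells ++ [[("type", t), ("content", String.ofList c)]] else cells,
     "code", [])
  else (cells, t, c ++ line ++ ['\n'])

def parse_jupytext_cells_py (content : String) : List (List (String × String)) :=
  let lines := PySem.Chars.splitOn content.toList ['\n']
  let st := lines.foldl pvStepA ([], "code", [])
  if PySem.Chars.strip st.2.2 ≠ [] then st.1 ++ [[("type", st.2.1), ("content", String.ofList st.2.2)]] else st.1

-- ===== PORT B =====
-- pass 1 of Source B: cut the line list into (type, lines) segments at the markers
def pvStepB (st : List (String × List (List Char)) × String × List (List Char)) (line : List Char) :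
    List (String × List (List Char)) × String × List (List Char) :=
  let (segs, t, ls) := st
  let marker := PySem.Chars.strip line
  if marker = "# %% [markdown]".toList ∨ marker = "# %%".toList then
    (segs ++ [(t, ls)],
     if marker = "# %% [markdown]".toList then "markdown" else "code", [])
  else (segs, t, ls ++ [line])

-- pass 2 of Source B: render one segment, keep it if its stripped content is truthy
def pvEmitSeg (cells : List (List (String × String))) (seg : String × List (List Char)) :
    List (List (String × String)) :=
  let text := if seg.2.isEmpty then [] else PySem.Chars.join ['\n'] seg.2 ++ ['\n']
  if PySem.Chars.strip text ≠ [] then cells ++ [[("type", seg.1), ("content", String.ofList text)]] else cells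

def parse_jupytext_cells_py_alt (content : String) : List (List (String × String)) :=
  let st := (PySem.Chars.splitOn content.toList ['\n']).foldl pvStepB ([], "code", [])
  (st.1 ++ [(st.2.1, st.2.2)]).foldl pvEmitSeg []

-- ===== PRECONDITION & SPEC =====
def Spec_parse_jupytext_cells_py (content : String) (out : List (List (String × String))) : Prop := out = parse_jupytext_cells_py_alt content
instance (content : String) (out : List (List (String × String))) : Decidable (Spec_parse_jupytext_cells_py content out) := by unfold Spec_parse_jupytext_cells_py; infer_instance

-- ===== CLAIM (what is proved, stated in full; the proofs are below) =====
def Claim_equal_parse_jupytext_cells_py : Prop := ∀ (content : String), Dom_parse_jupytext_cells_py content → Spec_parse_jupytext_cells_py content (parse_jupytext_cells_py content)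

-- ===== LEMMAS AND PROOFS =====

-- A's accumulated content for the lines collected so far in the current segment
def pvRender (ls : List (List Char)) : List Char :=
  ls.foldl (fun a l => a ++ l ++ ['\n']) []

lemma pvRender_snoc (ls : List (List Char)) (l : List Char) :
    pvRender (ls ++ [l]) = pvRender ls ++ l ++ ['\n'] := by
  simp [pvRender]

lemma pvJoin_snoc (sep p l : List Char) (rest : List (List Char)) :
    PySem.Chars.join sep (p :: rest ++ [l]) = PySem.Chars.join sep (p :: rest) ++ sep ++ l := by
  induction rest generalizing p with
  | nil => simp [PySem.Chars.join_cons_cons, PySem.Chars.join_singleton]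
  | cons q rest ih =>
    rw [show (p :: q :: rest) ++ [l] = p :: (q :: (rest ++ [l])) from by simp,
        PySem.Chars.join_cons_cons,
        show q :: (rest ++ [l]) = (q :: rest) ++ [l] from by simp,
        ih q, PySem.Chars.join_cons_cons]
    simp

-- Source B's rendering of a segment equals A's incremental accumulation
lemma pvText_eq_render (ls : List (List Char)) :
    (if ls.isEmpty then ([] : List Char) else PySem.Chars.join ['\n'] ls ++ ['\n']) = pvRender ls := by
  induction ls using List.reverseRecOn with
  | nil => simp [pvRender]
  | append_singleton ls l ih =>
    rw [pvRender_snoc, ← ih]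
    cases ls with
    | nil => simp [PySem.Chars.join_singleton]
    | cons p rest =>
      rw [show ((p :: rest) ++ [l] : List (List Char)).isEmpty = false from by simp,
          show ((p :: rest : List (List Char))).isEmpty = false from by simp]
      simp only [Bool.false_eq_true, if_false]
      rw [pvJoin_snoc ['\n'] p l rest]

lemma pvEmitSeg_eq (cells : List (List (String × String))) (t : String) (ls : List (List Char)) :
    pvEmitSeg cells (t, ls) =
      (if PySem.Chars.strip (pvRender ls) ≠ [] then
        cells ++ [[("type", t), ("content", String.ofList (pvRender ls))]] else cells) := by
  simp only [pvEmitSeg, pvText_eq_render]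

lemma pvStepA_md (cells : List (List (String × String))) (t : String) (c line : List Char)
    (h : PySem.Chars.strip line = "# %% [markdown]".toList) :
    pvStepA (cells, t, c) line =
      (if PySem.Chars.strip c ≠ [] then cells ++ [[("type", t), ("content", String.ofList c)]] else cells,
       "markdown", []) := by
  simp only [pvStepA]
  rw [if_pos h]

lemma pvStepA_code (cells : List (List (String × String))) (t : String) (c line : List Char)
    (h1 : PySem.Chars.strip line ≠ "# %% [markdown]".toList)
    (h2 : PySem.Chars.strip line = "# %%".toList) :
    pvStepA (cells, t, c) line =
      (if PySem.Chars.strip c ≠ [] then cells ++ [[("type", t), ("content", String.ofList c)]] else cells,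
       "code", []) := by
  simp only [pvStepA]
  rw [if_neg h1, if_pos h2]

lemma pvStepA_plain (cells : List (List (String × String))) (t : String) (c line : List Char)
    (h1 : PySem.Chars.strip line ≠ "# %% [markdown]".toList)
    (h2 : PySem.Chars.strip line ≠ "# %%".toList) :
    pvStepA (cells, t, c) line = (cells, t, c ++ line ++ ['\n']) := by
  simp only [pvStepA]
  rw [if_neg h1, if_neg h2]

lemma pvStepB_md (segs : List (String × List (List Char))) (t : String) (ls : List (List Char))
    (line : List Char) (h : PySem.Chars.strip line = "# %% [markdown]".toList) :
    pvStepB (segs, t, ls) line = (segs ++ [(t, ls)], "markdown", []) := by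
  simp only [pvStepB]
  rw [if_pos (Or.inl h), if_pos h]

lemma pvStepB_code (segs : List (String × List (List Char))) (t : String) (ls : List (List Char))
    (line : List Char) (h1 : PySem.Chars.strip line ≠ "# %% [markdown]".toList)
    (h2 : PySem.Chars.strip line = "# %%".toList) :
    pvStepB (segs, t, ls) line = (segs ++ [(t, ls)], "code", []) := by
  simp only [pvStepB]
  rw [if_pos (Or.inr h2), if_neg h1]

lemma pvStepB_plain (segs : List (String × List (List Char))) (t : String) (ls : List (List Char))
    (line : List Char) (h1 : PySem.Chars.strip line ≠ "# %% [markdown]".toList)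
    (h2 : PySem.Chars.strip line ≠ "# %%".toList) :
    pvStepB (segs, t, ls) line = (segs, t, ls ++ [line]) := by
  simp only [pvStepB]
  rw [if_neg (by tauto : ¬(PySem.Chars.strip line = "# %% [markdown]".toList ∨ PySem.Chars.strip line = "# %%".toList))]

-- final-flush of A's state expressed through pvEmitSeg
def pvFinishA (st : List (List (String × String)) × String × List Char) : List (List (String × String)) :=
  if PySem.Chars.strip st.2.2 ≠ [] then st.1 ++ [[("type", st.2.1), ("content", String.ofList st.2.2)]] else st.1

-- main loop invariant: running A's loop from a state that renders B's state gives B's two-pass result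
lemma pvMain (lines : List (List Char)) :
    ∀ (segs : List (String × List (List Char))) (t : String) (ls : List (List Char)),
      pvFinishA (lines.foldl pvStepA (segs.foldl pvEmitSeg [], t, pvRender ls)) =
      (let st := lines.foldl pvStepB (segs, t, ls)
       (st.1 ++ [(st.2.1, st.2.2)]).foldl pvEmitSeg []) := by
  induction lines with
  | nil =>
    intro segs t ls
    simp only [List.foldl_nil, List.foldl_append, List.foldl_cons, pvEmitSeg_eq, pvFinishA]
  | cons line rest ih =>
    intro segs t ls
    simp only [List.foldl_cons]
    by_cases h1 : PySem.Chars.strip line = "# %% [markdown]".toList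
    · rw [pvStepA_md _ _ _ _ h1, pvStepB_md _ _ _ _ h1]
      have := ih (segs ++ [(t, ls)]) "markdown" []
      simp only [List.foldl_append, List.foldl_cons, pvEmitSeg_eq, pvRender, List.foldl_nil] at this ⊢
      exact this
    · by_cases h2 : PySem.Chars.strip line = "# %%".toList
      · rw [pvStepA_code _ _ _ _ h1 h2, pvStepB_code _ _ _ _ h1 h2]
        have := ih (segs ++ [(t, ls)]) "code" []
        simp only [List.foldl_append, List.foldl_cons, pvEmitSeg_eq, pvRender, List.foldl_nil] at this ⊢
        exact this
      · rw [pvStepA_plain _ _ _ _ h1 h2, pvStepB_plain _ _ _ _ h1 h2]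
        have := ih segs t (ls ++ [line])
        rw [pvRender_snoc] at this
        exact this

-- ===== VERDICT (by name: the statement is the Claim_ definition above) =====
theorem parse_jupytext_cells_py_spec : Claim_equal_parse_jupytext_cells_py := by
  intro content _
  unfold Spec_parse_jupytext_cells_py parse_jupytext_cells_py parse_jupytext_cells_py_alt
  have := pvMain (PySem.Chars.splitOn content.toList ['\n']) [] "code" []
  simpa [pvRender, pvFinishA] using this
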